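-- pv_equiv track=rewrite | github.com/sdh20282/Algorithm | Programmers/Level_2/더 맵게.py | solution
-- ===== SOURCE A (Python) =====
-- import heapq
--
-- def solution(scoville, K):
--     heapq.heapify(scoville)
--     answer = 0
--
--     while True:
--         first = heapq.heappop(scoville)
--
--         if first >= K:
--             break
--
--         if len(scoville) < 1:
--             answer = -1
--             break
--
--         second = heapq.heappop(scoville)
--
--         heapq.heappush(scoville, first + second * 2)
--         answer += 1
--
--     return answer
-- ===== SOURCE B (Python) =====
-- def solution(scoville, K):
--     # Same count/-1 answer as the heap version, but via a sorted list kept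
--     # sorted by linear insertion (mutates scoville in place, like A does).
--     scoville.sort()
--     answer = 0
--     while True:
--         first = scoville.pop(0)
--         if first >= K:
--             break
--         if len(scoville) < 1:
--             answer = -1
--             break
--         second = scoville.pop(0)
--         v = first + second * 2
--         i = 0
--         while i < len(scoville) and scoville[i] <= v:
--             i += 1
--         scoville.insert(i, v)
--         answer += 1
--     return answer
-- ===== Notes on version B (the rewrite author's own statement) =====
-- stated objective: alternative
-- what changed: Replaces the binary heap (heapify/heappop/heappush) with a list sorted once up front and kept sorted by positional insertion, so the two minima are always the first two elements.
import Mathlib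
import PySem

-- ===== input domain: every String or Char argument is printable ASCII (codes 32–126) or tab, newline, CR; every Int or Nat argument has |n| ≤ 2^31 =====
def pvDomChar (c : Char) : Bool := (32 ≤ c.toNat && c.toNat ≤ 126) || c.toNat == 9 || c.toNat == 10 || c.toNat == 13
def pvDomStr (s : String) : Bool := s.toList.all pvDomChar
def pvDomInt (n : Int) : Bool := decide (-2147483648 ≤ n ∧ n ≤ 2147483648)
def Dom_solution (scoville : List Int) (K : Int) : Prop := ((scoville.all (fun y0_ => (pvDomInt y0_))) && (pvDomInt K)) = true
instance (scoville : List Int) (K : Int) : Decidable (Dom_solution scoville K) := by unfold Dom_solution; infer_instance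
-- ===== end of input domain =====

-- B replaces A's binary heap by a list sorted once and kept sorted by positional
-- insertion; equal return values only — both mutate `scoville` in place (A leaves
-- a heap, B a sorted remainder), the equivalence proved here is about the result.

-- ===== PORT A =====
-- heapq is a library call, ported by its value semantics on a heap of ints:
-- heapify is a no-op on the multiset of values, heappop removes one occurrence
-- of the minimum (exactly the value Python's heappop returns), heappush adds.
def heapLoop (K : Int) (l : List Int) (answer : Int) : Int :=
  match hm : l.min? with
  | none => 0        -- heappop from an empty heap: IndexError, excluded by Pre_
  | some first =>
    if first ≥ K then answer
    else if (l.erase first).length < 1 then -1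
    else match hm2 : (l.erase first).min? with
      | none => -1   -- unreachable: l.erase first is nonempty here
      | some second =>
        heapLoop K (((l.erase first).erase second) ++ [first + second * 2]) (answer + 1)
termination_by l.length
decreasing_by
  have h1 : first ∈ l := ((List.min?_eq_some_iff).mp hm).1
  have h2 : second ∈ l.erase first := ((List.min?_eq_some_iff).mp hm2).1
  have e1 := List.length_erase_of_mem h1
  have e2 := List.length_erase_of_mem h2
  simp only [List.length_append, List.length_cons, List.length_nil] at *
  omega

def solution (scoville : List Int) (K : Int) : Int :=
  heapLoop K scoville 0

-- ===== PORT B =====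
-- the inner while-loop + insert of Source B: insert v behind the ≤-prefix
def insortLoop (v : Int) : List Int → List Int
  | [] => [v]
  | a :: t => if a ≤ v then a :: insortLoop v t else v :: a :: t

theorem length_insortLoop (v : Int) (l : List Int) :
    (insortLoop v l).length = l.length + 1 := by
  induction l with
  | nil => rfl
  | cons a t ih => by_cases h : a ≤ v <;> simp [insortLoop, h, ih]

def mixLoop (K : Int) (l : List Int) (answer : Int) : Int :=
  match l with
  | [] => 0          -- pop(0) from an empty list: IndexError, excluded by Pre_
  | first :: rest =>
    if first ≥ K then answer
    else match rest with
      | [] => -1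
      | second :: rest2 => mixLoop K (insortLoop (first + second * 2) rest2) (answer + 1)
termination_by l.length
decreasing_by simp [length_insortLoop]

def solution_alt (scoville : List Int) (K : Int) : Int :=
  mixLoop K (PySem.List.sorted scoville (fun x => x) false) 0

-- ===== PRECONDITION & SPEC =====
-- Pre_ excludes only the empty list, on which both A and B raise IndexError.
def Pre_solution (scoville : List Int) (K : Int) : Prop := scoville ≠ []
instance (scoville : List Int) (K : Int) : Decidable (Pre_solution scoville K) := by
  unfold Pre_solution; infer_instance
def pvWitness_solution : List Int × Int := ([1, 2, 3, 9, 10, 12], 7)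

def Spec_solution (scoville : List Int) (K : Int) (out : Int) : Prop := out = solution_alt scoville K
instance (scoville : List Int) (K : Int) (out : Int) : Decidable (Spec_solution scoville K out) := by unfold Spec_solution; infer_instance

-- ===== CLAIM (what is proved, stated in full; the proofs are below) =====
def Claim_equal_solution : Prop := ∀ (scoville : List Int) (K : Int), Dom_solution scoville K → Pre_solution scoville K → Spec_solution scoville K (solution scoville K)

-- ===== LEMMAS AND PROOFS =====

theorem mem_insortLoop (v x : Int) (l : List Int) :
    x ∈ insortLoop v l ↔ x = v ∨ x ∈ l := by
  induction l with
  | nil => simp [insortLoop]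
  | cons a t ih =>
    by_cases h : a ≤ v <;> simp [insortLoop, h, ih] <;> tauto

theorem perm_insortLoop (v : Int) (l : List Int) :
    (insortLoop v l).Perm (v :: l) := by
  induction l with
  | nil => simp [insortLoop]
  | cons a t ih =>
    by_cases h : a ≤ v
    · simpa [insortLoop, h] using ((ih.cons a).trans (List.Perm.swap v a t)).symm.symm
    · simp [insortLoop, h]

theorem pairwise_insortLoop (v : Int) (l : List Int)
    (hl : l.Pairwise (· ≤ ·)) : (insortLoop v l).Pairwise (· ≤ ·) := by
  induction l with
  | nil => simp [insortLoop]
  | cons a t ih =>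
    rcases List.pairwise_cons.mp hl with ⟨ha, ht⟩
    by_cases h : a ≤ v
    · simp only [insortLoop, if_pos h]
      refine List.pairwise_cons.mpr ⟨?_, ih ht⟩
      intro x hx
      rcases (mem_insortLoop v x t).mp hx with rfl | hx
      · exact h
      · exact ha x hx
    · simp only [insortLoop, if_neg h]
      have hva : v ≤ a := le_of_lt (lt_of_not_ge h)
      refine List.pairwise_cons.mpr ⟨?_, hl⟩
      intro x hx
      rcases List.mem_cons.mp hx with rfl | hx
      · exact hva
      · exact le_trans hva (ha x hx)

theorem min?_of_perm_sorted {l : List Int} {first : Int} {rest : List Int}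
    (hp : (first :: rest).Perm l) (hs : (first :: rest).Pairwise (· ≤ ·)) :
    l.min? = some first := by
  rw [List.min?_eq_some_iff]
  constructor
  · exact hp.mem_iff.mp (List.mem_cons_self)
  · intro b hb
    rcases List.mem_cons.mp (hp.mem_iff.mpr hb) with rfl | hb'
    · exact le_refl _
    · exact (List.pairwise_cons.mp hs).1 b hb'

theorem loop_eq (n : Nat) : ∀ (l s : List Int) (K ans : Int),
    l.length ≤ n → s ≠ [] → s.Perm l → s.Pairwise (· ≤ ·) →
    heapLoop K l ans = mixLoop K s ans := by
  induction n with
  | zero =>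
    intro l s K ans hn hne hp _
    have hl : l = [] := List.length_eq_zero_iff.mp (by omega)
    subst hl
    exact absurd hp.eq_nil hne
  | succ n ih =>
    intro l s K ans hn hne hp hs
    match s, hne, hp, hs with
    | first :: rest, hne, hp, hs =>
      have hmin : l.min? = some first := min?_of_perm_sorted hp hs
      have hre : rest.Perm (l.erase first) := by
        have := hp.erase first
        simpa [List.erase_cons_head] using this
      rw [heapLoop.eq_def, mixLoop.eq_def]
      split
      · rename_i h
        simp [hmin] at h
      · rename_i f h
        rw [hmin] at h
        injection h with h
        subst h
        by_cases hK : first ≥ K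
        · simp [hK]
        · rw [if_neg hK]
          match rest, hre, hs with
          | [], hre, hs =>
            have hl1 : (l.erase first).length < 1 := by
              have := hre.length_eq; simp at this; omega
            simp [hl1, hK]
          | second :: rest2, hre, hs =>
            have hlen : ¬ (l.erase first).length < 1 := by
              have := hre.length_eq; simp at this; omega
            simp only [if_neg hlen]
            have hs' : (second :: rest2).Pairwise (· ≤ ·) :=
              (List.pairwise_cons.mp hs).2
            have hmin2 : (l.erase first).min? = some second :=
              min?_of_perm_sorted hre hs'
            split
            · rename_i h2
              simp [hmin2] at h2
            · rename_i f2 h2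
              rw [hmin2] at h2
              injection h2 with h2
              subst h2
              set v := first + second * 2 with hv
              have hre2 : rest2.Perm ((l.erase first).erase second) := by
                have := hre.erase second
                simpa [List.erase_cons_head] using this
              have hperm' : (insortLoop v rest2).Perm
                  (((l.erase first).erase second) ++ [v]) := by
                refine (perm_insortLoop v rest2).trans ((hre2.cons v).trans ?_)
                simpa using
                  (List.perm_middle (a := v)
                    (l₁ := (l.erase first).erase second) (l₂ := [])).symm
              rw [if_neg hK]
              refine ih _ _ K (ans + 1) ?_ ?_ hperm' (pairwise_insortLoop v rest2 (List.pairwise_cons.mp hs').2)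
              · have h1 := hperm'.length_eq
                have h2 := hp.length_eq
                simp only [length_insortLoop, List.length_cons] at h1 h2 ⊢
                omega
              · intro h
                have hc := length_insortLoop v rest2
                rw [h] at hc
                simp at hc

-- ===== VERDICT (by name: the statement is the Claim_ definition above) =====
theorem solution_spec : Claim_equal_solution := by
  intro scoville K _ hpre
  unfold Spec_solution solution solution_alt
  exact loop_eq scoville.length scoville
    (PySem.List.sorted scoville (fun x => x) false) K 0 le_rfl
    (by
      intro h
      exact hpre ((PySem.List.sorted_eq_nil_iff _ _ _).mp h))
    ((PySem.List.sorted_perm scoville (fun x => x) false))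
    (by simpa using PySem.List.sorted_pairwise (xs := scoville) (key := fun x => x))
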